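-- pv_equiv track=rewrite | github.com/wlrhkd49/Algorithms | programmers_level1/못생긴수.py | solution
-- ===== SOURCE A (Python) =====
-- def solution(array, commands):
--     answer = []
--     for i in commands:
--         x = i[0]-1
--         y = i[1]
--         z = i[2]-1
--         new_array = array[x:y]
--         new_array.sort()
--         answer.append(new_array[z])
--
--     return answer
-- ===== SOURCE B (Python) =====
-- def solution(array, commands):
--     # Selection by rank counting instead of sorting: for each command pick the
--     # element whose less-than / less-or-equal counts bracket the wanted rank.
--     answer = []
--     for i in commands:
--         s = array[i[0]-1:i[1]]
--         k = i[2]-1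
--         if k < 0:
--             k += len(s)
--         for v in s:
--             lt = sum(1 for u in s if u < v)
--             if lt <= k < lt + s.count(v):
--                 answer.append(v)
--                 break
--     return answer
-- ===== Notes on version B (the rewrite author's own statement) =====
-- stated objective: alternative
-- what changed: Replaces sort-the-slice-then-index with sort-free rank selection: for each command B scans the slice and picks the element whose less-than count and duplicate count bracket the requested rank (normalising a negative rank to rank+len first).
import Mathlib
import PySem

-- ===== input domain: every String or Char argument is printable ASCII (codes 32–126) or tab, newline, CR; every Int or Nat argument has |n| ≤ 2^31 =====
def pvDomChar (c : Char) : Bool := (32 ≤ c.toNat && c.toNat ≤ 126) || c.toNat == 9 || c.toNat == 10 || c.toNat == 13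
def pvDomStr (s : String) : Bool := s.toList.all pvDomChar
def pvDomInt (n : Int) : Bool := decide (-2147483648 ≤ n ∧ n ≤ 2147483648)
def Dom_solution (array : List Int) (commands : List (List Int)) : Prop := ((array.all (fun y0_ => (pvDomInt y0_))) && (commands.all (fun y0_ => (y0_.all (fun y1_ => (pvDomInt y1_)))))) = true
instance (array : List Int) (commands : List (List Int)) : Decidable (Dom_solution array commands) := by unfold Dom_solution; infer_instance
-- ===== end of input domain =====

-- B answers each command by rank counting over the slice instead of sorting it; same return value, no speed claim.

-- ===== PORT A =====
def solution (array : List Int) (commands : List (List Int)) : List Int :=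
  commands.foldl (fun answer i =>
    let x := PySem.List.pyGetD i 0 0 - 1
    let y := PySem.List.pyGetD i 1 0
    let z := PySem.List.pyGetD i 2 0 - 1
    let new_array := PySem.List.sorted (PySem.List.slice array (some x) (some y)) (fun v => v) false
    answer ++ [PySem.List.pyGetD new_array z 0]) []

-- ===== PORT B =====
-- the inner 'for v in s: … break' loop of Source B: first element of s whose rank counts bracket k
def kthPick (s : List Int) (k : Int) : List Int :=
  match s.find? (fun v => decide ((s.countP (fun u => decide (u < v)) : Int) ≤ k ∧
      k < (s.countP (fun u => decide (u < v)) : Int) + (s.count v : Int))) with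
  | some v => [v]
  | none => []

def solution_alt (array : List Int) (commands : List (List Int)) : List Int :=
  commands.foldl (fun answer i =>
    let s := PySem.List.slice array (some (PySem.List.pyGetD i 0 0 - 1)) (some (PySem.List.pyGetD i 1 0))
    let k0 := PySem.List.pyGetD i 2 0 - 1
    let k := if k0 < 0 then k0 + s.length else k0
    answer ++ kthPick s k) []

-- ===== PRECONDITION & SPEC =====
-- Pre_ excludes exactly the inputs on which Python A raises: a command with fewer than
-- three entries (IndexError on i[0]/i[1]/i[2]) or a rank i[2]-1 outside the slice (IndexError).
def Pre_solution (array : List Int) (commands : List (List Int)) : Prop :=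
  ∀ i ∈ commands, 3 ≤ i.length ∧
    PySem.Raise.InRange (PySem.List.slice array (some (PySem.List.pyGetD i 0 0 - 1))
      (some (PySem.List.pyGetD i 1 0))).length (PySem.List.pyGetD i 2 0 - 1)
instance (array : List Int) (commands : List (List Int)) : Decidable (Pre_solution array commands) := by
  unfold Pre_solution; infer_instance
def pvWitness_solution : List Int × List (List Int) :=
  ([1, 5, 2, 6, 3, 7, 4], [[2, 5, 3], [4, 4, 1], [1, 7, 3]])

def Spec_solution (array : List Int) (commands : List (List Int)) (out : List Int) : Prop := out = solution_alt array commands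
instance (array : List Int) (commands : List (List Int)) (out : List Int) : Decidable (Spec_solution array commands out) := by unfold Spec_solution; infer_instance

-- ===== CLAIM (what is proved, stated in full; the proofs are below) =====
def Claim_equal_solution : Prop := ∀ (array : List Int) (commands : List (List Int)), Dom_solution array commands → Pre_solution array commands → Spec_solution array commands (solution array commands)

-- ===== LEMMAS AND PROOFS =====

-- counting u ≤ v splits into u < v plus u = v (Int elements)
lemma countP_le_split (s : List Int) (v : Int) :
    s.countP (fun u => decide (u ≤ v)) = s.countP (fun u => decide (u < v)) + s.count v := by
  induction s with
  | nil => simp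
  | cons a t ih =>
    simp only [List.countP_cons, List.count_cons, ih]
    by_cases h1 : a ≤ v <;> by_cases h2 : a < v <;> by_cases h3 : a = v <;>
      simp [h1, h2, h3] <;> omega

-- the element at index j of a monotone list satisfies the rank bracket
lemma rank_bracket (t : List Int) (j : Nat) (hj : j < t.length)
    (hmono : ∀ (p q : Nat) (hp : p ≤ q) (hq : q < t.length), t[p]'(by omega) ≤ t[q]) :
    t.countP (fun u => decide (u < t[j])) ≤ j ∧
    j < t.countP (fun u => decide (u < t[j])) + t.count t[j] := by
  set v := t[j] with hv
  constructor
  · have hsplit : t.countP (fun u => decide (u < v)) =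
        (t.take j).countP (fun u => decide (u < v)) + (t.drop j).countP (fun u => decide (u < v)) := by
      rw [← List.countP_append, List.take_append_drop]
    have h0 : (t.drop j).countP (fun u => decide (u < v)) = 0 := by
      apply List.countP_eq_zero.mpr
      intro u hu
      rcases List.mem_iff_getElem.mp hu with ⟨p, hp, hup⟩
      have hle : v ≤ u := by
        rw [← hup, List.getElem_drop]
        exact hmono j (j + p) (by omega) (by simp at hp; omega)
      simp
      omega
    have h1 : (t.take j).countP (fun u => decide (u < v)) ≤ j := by
      calc (t.take j).countP (fun u => decide (u < v)) ≤ (t.take j).length := List.countP_le_length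
        _ ≤ j := by simp
    omega
  · rw [← countP_le_split]
    have hsplit : t.countP (fun u => decide (u ≤ v)) =
        (t.take (j+1)).countP (fun u => decide (u ≤ v)) + (t.drop (j+1)).countP (fun u => decide (u ≤ v)) := by
      rw [← List.countP_append, List.take_append_drop]
    have h1 : (t.take (j+1)).countP (fun u => decide (u ≤ v)) = j + 1 := by
      rw [List.countP_eq_length.mpr, List.length_take]
      · omega
      · intro u hu
        rcases List.mem_iff_getElem.mp hu with ⟨p, hp, hup⟩
        have hple : p ≤ j := by simp [List.length_take] at hp; omega
        have : u ≤ v := by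
          rw [← hup, List.getElem_take]
          exact hmono p j hple hj
        simpa using this
    omega

-- any two elements satisfying the rank bracket for the same k coincide
lemma bracket_unique (s : List Int) (k : Int) (v w : Int)
    (hv : (s.countP (fun u => decide (u < v)) : Int) ≤ k ∧
      k < (s.countP (fun u => decide (u < v)) : Int) + (s.count v : Int))
    (hw : (s.countP (fun u => decide (u < w)) : Int) ≤ k ∧
      k < (s.countP (fun u => decide (u < w)) : Int) + (s.count w : Int)) : w = v := by
  rcases lt_trichotomy w v with h | h | h
  · exfalso
    have hmono : s.countP (fun u => decide (u ≤ w)) ≤ s.countP (fun u => decide (u < v)) := by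
      apply List.countP_mono_left
      intro u _ hu
      simp at hu ⊢; omega
    have := countP_le_split s w
    omega
  · exact h
  · exfalso
    have hmono : s.countP (fun u => decide (u ≤ v)) ≤ s.countP (fun u => decide (u < w)) := by
      apply List.countP_mono_left
      intro u _ hu
      simp at hu ⊢; omega
    have := countP_le_split s v
    omega

-- pyGetD under InRange is getD at the normalised index
lemma pyGetD_norm (xs : List Int) (i : Int) (h : PySem.Raise.InRange xs.length i) :
    PySem.List.pyGetD xs i 0 = xs.getD (if i < 0 then i + xs.length else i).toNat 0 := by
  unfold PySem.Raise.InRange at h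
  by_cases hi : i < 0
  · have hk : 0 < (-i).toNat := by omega
    have hk2 : (-i).toNat ≤ xs.length := by omega
    have hrw : i = -((-i).toNat : Int) := by omega
    rw [hrw, PySem.List.pyGetD_neg_natCast _ _ _ hk hk2]
    simp [List.getD]
    rw [List.getElem?_eq_getElem (by omega)]
    congr 1
    omega
  · rw [PySem.List.pyGetD_eq_getElem (h0 := by omega) (h1 := by omega)]
    simp [List.getD]
    rw [List.getElem?_eq_getElem (by omega)]
    simp [hi]

-- per-slice core: rank selection equals indexing the sorted slice
lemma pick_eq (s : List Int) (k : Int) (h : PySem.Raise.InRange s.length k) :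
    kthPick s (if k < 0 then k + s.length else k) =
      [PySem.List.pyGetD (PySem.List.sorted s (fun v => v) false) k 0] := by
  set t := PySem.List.sorted s (fun v => v) false with ht
  have hperm : t.Perm s := PySem.List.sorted_perm s (fun v => v) false
  have hlen : t.length = s.length := hperm.length_eq
  have hIn : PySem.Raise.InRange t.length k := by
    unfold PySem.Raise.InRange at h ⊢; omega
  set k' := if k < 0 then k + (s.length : Int) else k with hk'
  have hk'range : 0 ≤ k' ∧ k' < (s.length : Int) := by
    unfold PySem.Raise.InRange at h
    rw [hk']; split <;> omega
  set j := k'.toNat with hj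
  have hjlt : j < t.length := by omega
  set v := t[j] with hv
  have hget : PySem.List.pyGetD t k 0 = v := by
    rw [pyGetD_norm t k hIn]
    have : (if k < 0 then k + (t.length : Int) else k).toNat = j := by
      rw [hj, hk']; split <;> omega
    rw [this, hv]
    simp [List.getD, List.getElem?_eq_getElem hjlt]
  have hbr := rank_bracket t j hjlt
    (fun p q hp hq => PySem.List.sorted_id_getElem_mono s hp hq)
  rw [← hv] at hbr
  have hcountP : ∀ p : Int → Bool, s.countP p = t.countP p := fun p => (hperm.countP_eq p).symm
  have hcount : ∀ x : Int, s.count x = t.count x := fun x => (hperm.count_eq x).symm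
  have hpv : ((s.countP (fun u => decide (u < v)) : Int) ≤ k' ∧
      k' < (s.countP (fun u => decide (u < v)) : Int) + (s.count v : Int)) := by
    rw [hcountP, hcount]
    have hjk : (j : Int) = k' := by omega
    omega
  have hvmem : v ∈ s := hperm.mem_iff.mp (List.getElem_mem hjlt)
  unfold kthPick
  rw [hget]
  cases hfind : s.find? (fun w => decide ((s.countP (fun u => decide (u < w)) : Int) ≤ k' ∧
      k' < (s.countP (fun u => decide (u < w)) : Int) + (s.count w : Int))) with
  | none =>
    exfalso
    have := List.find?_eq_none.mp hfind v hvmem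
    simp at this
    omega
  | some w =>
    have hw := List.find?_some hfind
    simp at hw
    have : w = v := bracket_unique s k' v w hpv hw
    rw [this]

-- ===== VERDICT (by name: the statement is the Claim_ definition above) =====
theorem solution_spec : Claim_equal_solution := by
  intro array commands _ hpre
  unfold Spec_solution solution solution_alt
  apply PySem.List.foldl_congr_mem
  intro acc i hi
  rcases hpre i hi with ⟨_, hIn⟩
  simp only []
  rw [← pick_eq _ _ hIn]
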